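-- pv_equiv track=rewrite | github.com/jsh9/pydoclint | pydoclint/utils/parse_docstring.py | _containsGoogleStylePattern
-- ===== SOURCE A (Python) =====
-- _GOOGLE_KEYWORDS = (
--     'Args:',
--     'Returns:',
--     'Yields:',
--     'Raises:',
--     'Examples:',
--     'Notes:',
-- )
--
-- def _containsGoogleStylePattern(docstring: str) -> bool:
--     """
--     Check if docstring contains Google-style section headers at base indent.
--     """
--     leadingIndent = _detectDocstringIndent(docstring)
--     for line in docstring.splitlines():
--         stripped = line.lstrip()
--         if stripped == '':
--             continue
--
--         currentIndent = len(line) - len(stripped)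
--         if currentIndent != leadingIndent:
--             continue
--
--         for keyword in _GOOGLE_KEYWORDS:
--             if stripped.startswith(keyword):
--                 return True
--
--     return False
--
-- def _detectDocstringIndent(docstring: str) -> int:
--     """
--     Detect the leading indentation level of a docstring.
--
--     This approximates the column where the opening triple quotes are placed by
--     measuring the smallest indentation across non-empty lines.
--     """
--     indent: int | None = None
--     for line in docstring.splitlines():
--         stripped = line.lstrip()
--         if stripped == '':
--             continue
--
--         currentIndent = len(line) - len(stripped)
--         if indent is None or currentIndent < indent:
--             indent = currentIndent
--
--     return 0 if indent is None else indent
-- ===== SOURCE B (Python) =====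
-- _GOOGLE_KEYWORDS = (
--     'Args:',
--     'Returns:',
--     'Yields:',
--     'Raises:',
--     'Examples:',
--     'Notes:',
-- )
--
-- def _containsGoogleStylePattern(docstring: str) -> bool:
--     # One pass: track the smallest indent seen so far and whether any line at
--     # that indent starts with a Google keyword; a new smaller indent resets it.
--     best = None
--     found = False
--     for line in docstring.splitlines():
--         stripped = line.lstrip()
--         if not stripped:
--             continue
--         indent = len(line) - len(stripped)
--         if best is None or indent < best:
--             best = indent
--             found = stripped.startswith(_GOOGLE_KEYWORDS)
--         elif indent == best:
--             found = found or stripped.startswith(_GOOGLE_KEYWORDS)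
--     return found
-- ===== Notes on version B (the rewrite author's own statement) =====
-- stated objective: alternative
-- what changed: Replaces A's two full scans (one to compute the minimum indent, one to look for a keyword line at that indent) by a single pass that tracks the running minimum indent and a keyword flag that is reset whenever a strictly smaller indent appears.
import Mathlib
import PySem

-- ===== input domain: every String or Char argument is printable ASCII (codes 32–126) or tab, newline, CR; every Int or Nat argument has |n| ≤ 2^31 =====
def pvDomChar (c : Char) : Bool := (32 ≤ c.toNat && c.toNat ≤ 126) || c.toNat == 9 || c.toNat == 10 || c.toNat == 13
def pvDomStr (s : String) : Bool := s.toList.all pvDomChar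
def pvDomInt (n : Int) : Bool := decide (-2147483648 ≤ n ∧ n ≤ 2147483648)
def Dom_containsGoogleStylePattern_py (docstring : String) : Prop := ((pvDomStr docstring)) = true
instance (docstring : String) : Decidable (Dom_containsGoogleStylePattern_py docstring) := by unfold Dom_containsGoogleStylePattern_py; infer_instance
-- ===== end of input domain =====

-- B: one pass tracking (min indent, keyword flag) instead of A's two scans; same cost class (objective: alternative).

-- ===== PORT A =====
def pvGoogleKeywords : List String :=
  ["Args:", "Returns:", "Yields:", "Raises:", "Examples:", "Notes:"]

-- step of the indent-detection loop of _detectDocstringIndent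
def pvMinStep (ind : Option Int) (line : String) : Option Int :=
  let stripped := PySem.Str.lstrip line
  if stripped = "" then ind
  else
    let currentIndent : Int := PySem.Str.len line - PySem.Str.len stripped
    match ind with
    | none => some currentIndent
    | some i => if currentIndent < i then some currentIndent else some i

def detectDocstringIndent_py (docstring : String) : Int :=
  ((PySem.Str.splitlines docstring).foldl pvMinStep none).getD 0

-- the main for-loop of _containsGoogleStylePattern (early return ⇒ structural recursion)
def pvALoop (leadingIndent : Int) : List String → Bool
  | [] => false
  | line :: rest =>
    let stripped := PySem.Str.lstrip line
    if stripped = "" then pvALoop leadingIndent rest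
    else
      let currentIndent : Int := PySem.Str.len line - PySem.Str.len stripped
      if currentIndent ≠ leadingIndent then pvALoop leadingIndent rest
      else if pvGoogleKeywords.any (fun k => PySem.Str.startswith stripped k) then true
      else pvALoop leadingIndent rest

def containsGoogleStylePattern_py (docstring : String) : Bool :=
  pvALoop (detectDocstringIndent_py docstring) (PySem.Str.splitlines docstring)

-- ===== PORT B =====
-- stripped.startswith(_GOOGLE_KEYWORDS): tuple form of str.startswith
def pvKw (stripped : String) : Bool :=
  pvGoogleKeywords.any (fun k => PySem.Str.startswith stripped k)

-- body of B's single loop over the lines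
def pvBStep (st : Option Int × Bool) (line : String) : Option Int × Bool :=
  let stripped := PySem.Str.lstrip line
  if stripped = "" then st
  else
    let indent : Int := PySem.Str.len line - PySem.Str.len stripped
    match st with
    | (none, _) => (some indent, pvKw stripped)
    | (some best, found) =>
      if indent < best then (some indent, pvKw stripped)
      else if indent = best then (some best, found || pvKw stripped)
      else (some best, found)

def containsGoogleStylePattern_py_alt (docstring : String) : Bool :=
  ((PySem.Str.splitlines docstring).foldl pvBStep (none, false)).2

-- ===== PRECONDITION & SPEC =====
def Spec_containsGoogleStylePattern_py (docstring : String) (out : Bool) : Prop := out = containsGoogleStylePattern_py_alt docstring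
instance (docstring : String) (out : Bool) : Decidable (Spec_containsGoogleStylePattern_py docstring out) := by unfold Spec_containsGoogleStylePattern_py; infer_instance

-- ===== CLAIM (what is proved, stated in full; the proofs are below) =====
def Claim_equal_containsGoogleStylePattern_py : Prop := ∀ (docstring : String), Dom_containsGoogleStylePattern_py docstring → Spec_containsGoogleStylePattern_py docstring (containsGoogleStylePattern_py docstring)

-- ===== LEMMAS AND PROOFS =====

-- abbreviations used only in the proofs
def pvInd (line : String) : Int := PySem.Str.len line - PySem.Str.len (PySem.Str.lstrip line)

-- the per-line predicate A's keyword loop tests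
def pvG (m : Int) (line : String) : Bool :=
  if PySem.Str.lstrip line = "" then false
  else if pvInd line = m then pvKw (PySem.Str.lstrip line)
  else false

-- evaluation lemmas for the two loop bodies
theorem pvMinStep_blank {l : String} (o : Option Int) (hb : PySem.Str.lstrip l = "") :
    pvMinStep o l = o := by
  simp only [pvMinStep]; rw [if_pos hb]

theorem pvMinStep_app_none {l : String} (hb : ¬ PySem.Str.lstrip l = "") :
    pvMinStep none l = some (pvInd l) := by
  simp only [pvMinStep, pvInd]; rw [if_neg hb]

theorem pvMinStep_app_lt {l : String} {i : Int} (hb : ¬ PySem.Str.lstrip l = "")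
    (h : pvInd l < i) : pvMinStep (some i) l = some (pvInd l) := by
  unfold pvInd at h ⊢; simp only [pvMinStep]; rw [if_neg hb, if_pos h]

theorem pvMinStep_app_ge {l : String} {i : Int} (hb : ¬ PySem.Str.lstrip l = "")
    (h : ¬ pvInd l < i) : pvMinStep (some i) l = some i := by
  unfold pvInd at h; simp only [pvMinStep]; rw [if_neg hb, if_neg h]

theorem pvBStep_blank {l : String} (st : Option Int × Bool) (hb : PySem.Str.lstrip l = "") :
    pvBStep st l = st := by
  simp only [pvBStep]; rw [if_pos hb]

theorem pvBStep_app_none {l : String} (f : Bool) (hb : ¬ PySem.Str.lstrip l = "") :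
    pvBStep (none, f) l = (some (pvInd l), pvKw (PySem.Str.lstrip l)) := by
  simp only [pvBStep, pvInd]; rw [if_neg hb]

theorem pvBStep_app_lt {l : String} {b : Int} (f : Bool) (hb : ¬ PySem.Str.lstrip l = "")
    (h : pvInd l < b) : pvBStep (some b, f) l = (some (pvInd l), pvKw (PySem.Str.lstrip l)) := by
  unfold pvInd at h ⊢; simp only [pvBStep]; rw [if_neg hb, if_pos h]

theorem pvBStep_app_eq {l : String} {b : Int} (f : Bool) (hb : ¬ PySem.Str.lstrip l = "")
    (hlt : ¬ pvInd l < b) (h : pvInd l = b) :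
    pvBStep (some b, f) l = (some b, f || pvKw (PySem.Str.lstrip l)) := by
  unfold pvInd at hlt h; simp only [pvBStep]; rw [if_neg hb, if_neg hlt, if_pos h]

theorem pvBStep_app_gt {l : String} {b : Int} (f : Bool) (hb : ¬ PySem.Str.lstrip l = "")
    (hlt : ¬ pvInd l < b) (h : ¬ pvInd l = b) : pvBStep (some b, f) l = (some b, f) := by
  unfold pvInd at hlt h; simp only [pvBStep]; rw [if_neg hb, if_neg hlt, if_neg h]

theorem pvG_blank {l : String} (m : Int) (hb : PySem.Str.lstrip l = "") : pvG m l = false := by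
  simp only [pvG]; rw [if_pos hb]

theorem pvG_eq {l : String} {m : Int} (hb : ¬ PySem.Str.lstrip l = "") (h : pvInd l = m) :
    pvG m l = pvKw (PySem.Str.lstrip l) := by
  simp only [pvG]; rw [if_neg hb, if_pos h]

theorem pvG_ne {l : String} {m : Int} (h : ¬ pvInd l = m) : pvG m l = false := by
  simp only [pvG]
  by_cases hb : PySem.Str.lstrip l = ""
  · rw [if_pos hb]
  · rw [if_neg hb, if_neg h]

-- A's keyword loop is the `any` of pvG over the lines
theorem pvALoop_eq_any (m : Int) (ls : List String) : pvALoop m ls = ls.any (pvG m) := by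
  induction ls with
  | nil => rfl
  | cons l rest ih =>
    rw [List.any_cons, ← ih]
    simp only [pvALoop]
    by_cases h1 : PySem.Str.lstrip l = ""
    · rw [if_pos h1, pvG_blank m h1, Bool.false_or]
    · rw [if_neg h1]
      by_cases h2 : pvInd l = m
      · have h2' := h2; unfold pvInd at h2'
        rw [if_neg (not_not_intro h2'), pvG_eq h1 h2,
            show (pvGoogleKeywords.any fun k => PySem.Str.startswith (PySem.Str.lstrip l) k) = pvKw (PySem.Str.lstrip l) from rfl]
        cases h3 : pvKw (PySem.Str.lstrip l) with
        | false => simp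
        | true => simp
      · have h2' := h2; unfold pvInd at h2'
        rw [if_pos h2', pvG_ne h2, Bool.false_or]

-- folding pvMinStep from a `some` state stays `some` and never increases
theorem pvMinStep_fold_some (ls : List String) (i : Int) :
    ∃ m, ls.foldl pvMinStep (some i) = some m ∧ m ≤ i := by
  induction ls generalizing i with
  | nil => exact ⟨i, rfl, le_refl i⟩
  | cons l rest ih =>
    rw [List.foldl_cons]
    by_cases hb : PySem.Str.lstrip l = ""
    · rw [pvMinStep_blank _ hb]; exact ih i
    · by_cases h2 : pvInd l < i
      · rw [pvMinStep_app_lt hb h2]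
        obtain ⟨m, hm, hle⟩ := ih (pvInd l)
        exact ⟨m, hm, by omega⟩
      · rw [pvMinStep_app_ge hb h2]; exact ih i
-- if the min-fold returns `some m`, every nonblank line has indent ≥ m
theorem pvMinStep_fold_lower (ls : List String) (o : Option Int) (m : Int)
    (h : ls.foldl pvMinStep o = some m) :
    ∀ x ∈ ls, PySem.Str.lstrip x ≠ "" → m ≤ pvInd x := by
  induction ls generalizing o with
  | nil => intro x hx; exact absurd hx (List.not_mem_nil)
  | cons l rest ih =>
    intro x hx hxb
    rcases List.mem_cons.mp hx with rfl | hx'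
    · rw [List.foldl_cons] at h
      cases o with
      | none =>
        rw [pvMinStep_app_none hxb] at h
        obtain ⟨m', hm', hle⟩ := pvMinStep_fold_some rest (pvInd x)
        rw [hm'] at h; injection h with h; omega
      | some i =>
        by_cases h2 : pvInd x < i
        · rw [pvMinStep_app_lt hxb h2] at h
          obtain ⟨m', hm', hle⟩ := pvMinStep_fold_some rest (pvInd x)
          rw [hm'] at h; injection h with h; omega
        · rw [pvMinStep_app_ge hxb h2] at h
          obtain ⟨m', hm', hle⟩ := pvMinStep_fold_some rest i
          rw [hm'] at h; injection h with h; omega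
    · exact ih _ (by rw [List.foldl_cons] at h; exact h) x hx' hxb

-- if the min-fold from `none` returns `none`, every line is blank
theorem pvMinStep_fold_none (ls : List String) (h : ls.foldl pvMinStep none = none) :
    ∀ x ∈ ls, PySem.Str.lstrip x = "" := by
  induction ls with
  | nil => intro x hx; exact absurd hx (List.not_mem_nil)
  | cons l rest ih =>
    intro x hx
    by_cases hb : PySem.Str.lstrip l = ""
    · rcases List.mem_cons.mp hx with rfl | hx'
      · exact hb
      · exact ih (by rwa [List.foldl_cons, pvMinStep_blank _ hb] at h) x hx'
    · exfalso
      rw [List.foldl_cons, pvMinStep_app_none hb] at h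
      obtain ⟨m', hm', _⟩ := pvMinStep_fold_some rest (pvInd l)
      rw [hm'] at h; exact Option.some_ne_none _ h

-- no line satisfies pvG when all lines are blank …
theorem pvAny_false_of_all_blank (ls : List String) (m : Int)
    (h : ∀ x ∈ ls, PySem.Str.lstrip x = "") : ls.any (pvG m) = false := by
  rw [List.any_eq_false]
  intro x hx
  rw [pvG_blank m (h x hx)]
  exact Bool.false_ne_true

-- … or when the tested indent lies strictly below every nonblank line's indent
theorem pvAny_false_of_lt_min (ls : List String) (m c : Int) (hcm : c < m)
    (h : ∀ x ∈ ls, PySem.Str.lstrip x ≠ "" → m ≤ pvInd x) : ls.any (pvG c) = false := by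
  rw [List.any_eq_false]
  intro x hx
  by_cases h1 : PySem.Str.lstrip x = ""
  · rw [pvG_blank c h1]; exact Bool.false_ne_true
  · have hm := h x hx h1
    rw [pvG_ne (by omega)]
    exact Bool.false_ne_true

-- the single-pass fold computes (min indent, "some line at min indent matches")
theorem pvBStep_fold_spec (ls : List String) :
    ls.foldl pvBStep (none, false) =
      (ls.foldl pvMinStep none,
       match ls.foldl pvMinStep none with
       | none => false
       | some m => ls.any (pvG m)) := by
  induction ls using List.reverseRecOn with
  | nil => rfl
  | append_singleton ls l ih =>
    rw [List.foldl_append, List.foldl_append, ih]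
    simp only [List.foldl_cons, List.foldl_nil]
    by_cases hb : PySem.Str.lstrip l = ""
    · rw [pvBStep_blank _ hb, pvMinStep_blank _ hb]
      cases hM : ls.foldl pvMinStep none with
      | none => simp
      | some m => simp [List.any_append, pvG_blank m hb]
    · cases hM : ls.foldl pvMinStep none with
      | none =>
        have hall := pvMinStep_fold_none ls hM
        rw [pvBStep_app_none _ hb, pvMinStep_app_none hb]
        simp [List.any_append, pvAny_false_of_all_blank ls (pvInd l) hall,
          pvG_eq hb rfl]
      | some m =>
        have hlow := pvMinStep_fold_lower ls none m hM
        by_cases h1 : pvInd l < m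
        · rw [pvBStep_app_lt _ hb h1, pvMinStep_app_lt hb h1]
          simp [List.any_append, pvAny_false_of_lt_min ls m (pvInd l) h1 hlow,
            pvG_eq hb rfl]
        · by_cases h2 : pvInd l = m
          · rw [pvBStep_app_eq _ hb h1 h2, pvMinStep_app_ge hb h1]
            simp [List.any_append, pvG_eq hb h2]
          · rw [pvBStep_app_gt _ hb h1 h2, pvMinStep_app_ge hb h1]
            simp [List.any_append, pvG_ne h2]

-- ===== VERDICT (by name: the statement is the Claim_ definition above) =====
theorem containsGoogleStylePattern_py_spec : Claim_equal_containsGoogleStylePattern_py := by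
  intro docstring _
  unfold Spec_containsGoogleStylePattern_py containsGoogleStylePattern_py
    containsGoogleStylePattern_py_alt detectDocstringIndent_py
  rw [pvBStep_fold_spec]
  cases hM : (PySem.Str.splitlines docstring).foldl pvMinStep none with
  | none =>
    have hall := pvMinStep_fold_none _ hM
    have h0 := pvAny_false_of_all_blank (PySem.Str.splitlines docstring) 0 hall
    simpa [pvALoop_eq_any] using h0
  | some m =>
    simp [pvALoop_eq_any]
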